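-- pv_equiv track=rewrite | github.com/shamith2/ece_365 | Genomics_Lab1/main.py | check_impurity
-- ===== SOURCE A (Python) =====
-- def check_impurity(dna_reads) :
--     '''
--     Input - list of dna reads
--     Output - list of reads which have impurities, a set of impure chars
--     '''
--     #start code here
--     impure_reads = []
--     impure_chars = set()
--
--     for dna_read in dna_reads:
--         impure = False
--
--         for char in dna_read:
--             if char.lower() not in ['a', 'c', 'g', 't']:
--                 impure_chars.add(char)
--                 impure = True
--
--         if impure == True:
--             impure_reads.append(dna_read)
--
--     return impure_reads, impure_chars
-- ===== SOURCE B (Python) =====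
-- def check_impurity(dna_reads):
--     '''
--     Input - list of dna reads
--     Output - list of reads which have impurities, a set of impure chars
--     '''
--     allowed = set('acgtACGT')
--     impure_reads = [r for r in dna_reads if not set(r) <= allowed]
--     impure_chars = set(''.join(dna_reads)) - allowed
--     return impure_reads, impure_chars
-- ===== Notes on version B (the rewrite author's own statement) =====
-- stated objective: simpler
-- what changed: Replaces A's nested loop with per-character membership tests and an impure flag by two whole-list operations: a comprehension keeping reads whose character set is not a subset of set('acgtACGT'), and one set-difference set(''.join(dna_reads)) - allowed for the impure characters.
import Mathlib
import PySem

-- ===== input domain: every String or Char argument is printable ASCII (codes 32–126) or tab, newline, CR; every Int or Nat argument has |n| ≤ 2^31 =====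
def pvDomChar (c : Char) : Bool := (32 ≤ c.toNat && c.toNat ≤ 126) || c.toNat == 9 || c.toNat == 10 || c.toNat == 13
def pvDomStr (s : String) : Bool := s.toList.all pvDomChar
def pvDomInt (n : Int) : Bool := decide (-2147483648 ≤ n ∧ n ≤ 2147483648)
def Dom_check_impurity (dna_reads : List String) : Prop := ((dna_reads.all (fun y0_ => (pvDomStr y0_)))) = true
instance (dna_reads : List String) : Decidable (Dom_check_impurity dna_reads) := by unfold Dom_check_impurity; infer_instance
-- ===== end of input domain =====

-- B replaces A's nested loop (per-character membership test + impure flag) by a subset-test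
-- comprehension over the reads and one set-difference on the characters of the joined reads; simpler,
-- same cost. Python 'char' values (one-char strings) are modelled as Char; both ports return the char
-- set mapped through String.singleton, matching the List String signature.

-- ===== PORT A =====
def check_impurity (dna_reads : List String) : List String × List String :=
  let st := dna_reads.foldl (fun (st : List String × PySem.Set Char) dna_read =>
    let inner := dna_read.toList.foldl (fun (p : PySem.Set Char × Bool) char =>
      if PySem.Chars.lowerChar char ∉ (['a', 'c', 'g', 't'] : List Char) then
        (PySem.Set.add p.1 char, true)
      else p) (st.2, false)
    if inner.2 then (st.1 ++ [dna_read], inner.1) else (st.1, inner.1))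
    ([], PySem.Set.empty)
  (st.1, st.2.map String.singleton)

-- ===== PORT B =====
def check_impurity_alt (dna_reads : List String) : List String × List String :=
  let allowed : PySem.Set Char := PySem.Set.ofList "acgtACGT".toList
  let impure_reads := dna_reads.filter
    (fun r => !(PySem.Set.issubset (PySem.Set.ofList r.toList) allowed))
  let impure_chars :=
    PySem.Set.diff (PySem.Set.ofList (PySem.Str.join "" dna_reads).toList) allowed
  (impure_reads, impure_chars.map String.singleton)

-- ===== PRECONDITION & SPEC =====
def Spec_check_impurity (dna_reads : List String) (out : List String × List String) : Prop := out = check_impurity_alt dna_reads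
instance (dna_reads : List String) (out : List String × List String) : Decidable (Spec_check_impurity dna_reads out) := by unfold Spec_check_impurity; infer_instance

-- ===== CLAIM (what is proved, stated in full; the proofs are below) =====
def Claim_equal_check_impurity : Prop := ∀ (dna_reads : List String), Dom_check_impurity dna_reads → Spec_check_impurity dna_reads (check_impurity dna_reads)

-- ===== LEMMAS AND PROOFS =====

/-- "this char is impure", as B's port tests it. -/
def pvBad (c : Char) : Bool := !(PySem.Set.ofList "acgtACGT".toList).contains c

theorem pv_char_eq_iff (a b : Char) : a = b ↔ a.toNat = b.toNat := by
  constructor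
  · rintro rfl; rfl
  · intro h; exact Char.ext (UInt32.toNat_inj.mp h)

theorem pv_char_le_iff (a b : Char) : a ≤ b ↔ a.toNat ≤ b.toNat := by
  rw [Char.le_def, UInt32.le_iff_toNat_le]; rfl

theorem pv_lower_mem (c : Char) :
    PySem.Chars.lowerChar c ∈ (['a', 'c', 'g', 't'] : List Char) ↔ c ∈ "acgtACGT".toList := by
  have h8 : "acgtACGT".toList = ['a', 'c', 'g', 't', 'A', 'C', 'G', 'T'] := rfl
  rw [h8]
  unfold PySem.Chars.lowerChar PySem.Chars.isupper
  by_cases h : 'A' ≤ c ∧ c ≤ 'Z'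
  · rw [if_pos (by simpa using h)]
    rw [pv_char_le_iff, pv_char_le_iff] at h
    simp only [show ('A' : Char).toNat = 65 from rfl, show ('Z' : Char).toNat = 90 from rfl] at h
    have hv : (Char.ofNat (c.toNat + 32)).toNat = c.toNat + 32 := by
      have hlt : c.toNat + 32 < 55296 := by omega
      simp [Char.toNat_ofNat, Nat.isValidChar, hlt]
    simp only [List.mem_cons, List.not_mem_nil, or_false, pv_char_eq_iff, hv]
    simp only [show ('a' : Char).toNat = 97 from rfl, show ('c' : Char).toNat = 99 from rfl,
      show ('g' : Char).toNat = 103 from rfl, show ('t' : Char).toNat = 116 from rfl,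
      show ('A' : Char).toNat = 65 from rfl, show ('C' : Char).toNat = 67 from rfl,
      show ('G' : Char).toNat = 71 from rfl, show ('T' : Char).toNat = 84 from rfl]
    omega
  · rw [if_neg (by simpa using h)]
    rw [pv_char_le_iff, pv_char_le_iff] at h
    simp only [show ('A' : Char).toNat = 65 from rfl, show ('Z' : Char).toNat = 90 from rfl] at h
    simp only [List.mem_cons, List.not_mem_nil, or_false, pv_char_eq_iff]
    simp only [show ('a' : Char).toNat = 97 from rfl, show ('c' : Char).toNat = 99 from rfl,
      show ('g' : Char).toNat = 103 from rfl, show ('t' : Char).toNat = 116 from rfl,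
      show ('A' : Char).toNat = 65 from rfl, show ('C' : Char).toNat = 67 from rfl,
      show ('G' : Char).toNat = 71 from rfl, show ('T' : Char).toNat = 84 from rfl]
    omega

theorem pvBad_true (c : Char) : pvBad c = true ↔ c ∉ "acgtACGT".toList := by
  rw [pvBad, Bool.not_eq_true', ← Bool.not_eq_true, PySem.Set.contains_iff, PySem.Set.mem_ofList]

theorem pvBad_iff (c : Char) :
    PySem.Chars.lowerChar c ∉ (['a', 'c', 'g', 't'] : List Char) ↔ pvBad c = true := by
  rw [pvBad_true]
  exact not_congr (pv_lower_mem c)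

theorem pv_inner (cs : List Char) (s : PySem.Set Char) (b : Bool) :
    cs.foldl (fun (p : PySem.Set Char × Bool) char =>
      if PySem.Chars.lowerChar char ∉ (['a', 'c', 'g', 't'] : List Char) then
        (PySem.Set.add p.1 char, true)
      else p) (s, b)
    = (List.foldl PySem.Set.add s (cs.filter pvBad), b || cs.any pvBad) := by
  induction cs generalizing s b with
  | nil => simp
  | cons c cs ih =>
    simp only [List.foldl_cons]
    by_cases h : PySem.Chars.lowerChar c ∉ (['a', 'c', 'g', 't'] : List Char)
    · rw [if_pos h, ih]
      have hb : pvBad c = true := (pvBad_iff c).mp h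
      simp [List.any_cons, List.foldl_cons, hb]
    · rw [if_neg h, ih]
      have hb : pvBad c = false := by
        cases hpv : pvBad c
        · rfl
        · exact absurd ((pvBad_iff c).mpr hpv) h
      simp [List.any_cons, hb]

theorem pv_outer (reads : List String) (acc : List String) (s : PySem.Set Char) :
    reads.foldl (fun (st : List String × PySem.Set Char) dna_read =>
      let inner := dna_read.toList.foldl (fun (p : PySem.Set Char × Bool) char =>
        if PySem.Chars.lowerChar char ∉ (['a', 'c', 'g', 't'] : List Char) then
          (PySem.Set.add p.1 char, true)
        else p) (st.2, false)
      if inner.2 then (st.1 ++ [dna_read], inner.1) else (st.1, inner.1)) (acc, s)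
    = (acc ++ reads.filter (fun r => r.toList.any pvBad),
       List.foldl PySem.Set.add s ((reads.flatMap String.toList).filter pvBad)) := by
  have hfun : (fun (st : List String × PySem.Set Char) (dna_read : String) =>
      let inner := dna_read.toList.foldl (fun (p : PySem.Set Char × Bool) char =>
        if PySem.Chars.lowerChar char ∉ (['a', 'c', 'g', 't'] : List Char) then
          (PySem.Set.add p.1 char, true)
        else p) (st.2, false)
      if inner.2 then (st.1 ++ [dna_read], inner.1) else (st.1, inner.1))
    = (fun (st : List String × PySem.Set Char) (dna_read : String) =>
        if dna_read.toList.any pvBad = true then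
          (st.1 ++ [dna_read], List.foldl PySem.Set.add st.2 (dna_read.toList.filter pvBad))
        else (st.1, List.foldl PySem.Set.add st.2 (dna_read.toList.filter pvBad))) := by
    funext st dna_read
    simp only [pv_inner, Bool.false_or]
  rw [hfun]
  induction reads generalizing acc s with
  | nil => simp
  | cons r rs ih =>
    simp only [List.foldl_cons]
    by_cases h : r.toList.any pvBad = true
    · rw [if_pos h, ih]
      simp [h, List.flatMap_cons, List.filter_append,
        List.foldl_append, List.append_assoc]
    · have h' : r.toList.any pvBad = false := by
        cases hpv : r.toList.any pvBad
        · rfl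
        · exact absurd hpv h
      rw [if_neg h, ih]
      simp [h', List.flatMap_cons, List.filter_append, List.foldl_append]

theorem pv_filter_add (p : Char → Bool) (s : PySem.Set Char) (x : Char) :
    (PySem.Set.add s x).filter p
      = if p x then PySem.Set.add (s.filter p) x else s.filter p := by
  unfold PySem.Set.add
  by_cases hc : s.contains x = true
  · rw [if_pos hc]
    by_cases hp : p x = true
    · rw [if_pos hp, if_pos (by
        rw [PySem.Set.contains_iff, List.mem_filter]
        exact ⟨PySem.Set.contains_iff s x |>.mp hc, hp⟩)]
    · simp [hp]
  · rw [if_neg hc, List.filter_append]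
    by_cases hp : p x = true
    · rw [if_pos hp, if_neg (by
        rw [PySem.Set.contains_iff, List.mem_filter]
        intro hmem
        exact hc (PySem.Set.contains_iff s x |>.mpr hmem.1))]
      simp [hp]
    · simp [hp]

theorem pv_filter_foldl_add (p : Char → Bool) :
    ∀ (l : List Char) (s : PySem.Set Char),
      (List.foldl PySem.Set.add s l).filter p
        = List.foldl PySem.Set.add (s.filter p) (l.filter p) := by
  intro l
  induction l with
  | nil => intro s; rfl
  | cons x xs ih =>
    intro s
    rw [List.foldl_cons, ih, pv_filter_add, List.filter_cons]
    by_cases hp : p x = true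
    · rw [if_pos hp]; simp [hp]
    · simp [hp]

theorem pv_intercalate_nil (ls : List (List Char)) :
    List.intercalate [] ls = ls.flatten := by
  induction ls with
  | nil => rfl
  | cons x t ih =>
    cases t with
    | nil => simp [List.intercalate]
    | cons y t' =>
      simp only [List.intercalate, List.intersperse] at ih ⊢
      simp_all

theorem pv_join_nil (parts : List String) :
    (PySem.Str.join "" parts).toList = parts.flatMap String.toList := by
  rw [PySem.Str.toList_join]
  unfold PySem.Chars.join
  rw [show ("" : String).toList = [] from rfl, pv_intercalate_nil, List.flatMap_def]

theorem pv_issubset (r : String) :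
    (!(PySem.Set.issubset (PySem.Set.ofList r.toList) (PySem.Set.ofList "acgtACGT".toList)))
      = r.toList.any pvBad := by
  cases hb : r.toList.any pvBad with
  | false =>
    rw [List.any_eq_false] at hb
    rw [Bool.not_eq_false', PySem.Set.issubset_iff]
    intro x hx
    rw [PySem.Set.mem_ofList] at hx ⊢
    exact not_not.mp (fun hn => hb x hx ((pvBad_true x).mpr hn))
  | true =>
    rw [List.any_eq_true] at hb
    obtain ⟨x, hx, hbad⟩ := hb
    rw [Bool.not_eq_true', ← Bool.not_eq_true, PySem.Set.issubset_iff]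
    intro hall
    have hmem := hall x ((PySem.Set.mem_ofList _ _).mpr hx)
    rw [PySem.Set.mem_ofList] at hmem
    exact (pvBad_true x).mp hbad hmem

-- ===== VERDICT (by name: the statement is the Claim_ definition above) =====
theorem check_impurity_spec : Claim_equal_check_impurity := by
  intro dna_reads _
  unfold Spec_check_impurity check_impurity check_impurity_alt
  rw [pv_outer]
  simp only [List.nil_append]
  refine Prod.ext ?_ ?_
  · show List.filter (fun r => r.toList.any pvBad) dna_reads
        = List.filter (fun r => !(PySem.Set.issubset (PySem.Set.ofList r.toList) (PySem.Set.ofList "acgtACGT".toList))) dna_reads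
    exact (List.filter_congr (fun r _ => pv_issubset r)).symm
  · show (List.foldl PySem.Set.add PySem.Set.empty ((dna_reads.flatMap String.toList).filter pvBad)).map String.singleton
        = (PySem.Set.diff (PySem.Set.ofList (PySem.Str.join "" dna_reads).toList) (PySem.Set.ofList "acgtACGT".toList)).map String.singleton
    congr 1
    rw [pv_join_nil]
    have hdiff : PySem.Set.diff (PySem.Set.ofList (dna_reads.flatMap String.toList)) (PySem.Set.ofList "acgtACGT".toList)
        = (PySem.Set.ofList (dna_reads.flatMap String.toList)).filter pvBad := rfl
    rw [hdiff]
    rw [show PySem.Set.ofList (dna_reads.flatMap String.toList)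
        = List.foldl PySem.Set.add PySem.Set.empty (dna_reads.flatMap String.toList) from rfl]
    rw [pv_filter_foldl_add]
    rfl
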